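-- pv_equiv track=rewrite | github.com/ArinMnw/Copter01_AI_Bot_2 | strategy9.py | _pivot_low
-- ===== SOURCE A (Python) =====
-- def _pivot_low(values, idx: int, left: int, right: int) -> bool:
--     if idx - left < 0 or idx + right >= len(values):
--         return False
--     center = values[idx]
--     if center is None:
--         return False
--     window = values[idx - left:idx + right + 1]
--     if any(v is None for v in window):
--         return False
--     if center != min(window):
--         return False
--     return window.count(center) == 1
-- ===== SOURCE B (Python) =====
-- def _strict_above(values, start, stop, center):
--     # recursively check that every value at positions start..stop-1 is non-None
--     # and strictly greater than center
--     if start >= stop: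
--         return True
--     v = values[start]
--     if v is None or v <= center:
--         return False
--     return _strict_above(values, start + 1, stop, center)
--
--
-- def _pivot_low(values, idx: int, left: int, right: int) -> bool:
--     lo = idx - left
--     hi = idx + right
--     if lo < 0 or hi >= len(values):
--         return False
--     center = values[idx]
--     if center is None:
--         return False
--     return _strict_above(values, lo, idx, center) and \
--            _strict_above(values, idx + 1, hi + 1, center)
-- ===== Notes on version B (the rewrite author's own statement) =====
-- stated objective: alternative
-- what changed: Instead of slicing out the window and running three library reductions over it (any-None scan, min, count==1), B recursively checks that each neighbour left and right of the center is non-None and strictly greater than the center, via a recursive helper over an index interval; no window copy and no library reductions.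
-- outside the precondition, e.g. on _pivot_low([1, 2, 3], 1, -1, 1): A returns False, B returns True; on _pivot_low([5, 2, 2], 1, -1, 1): A returns True, B returns False
import Mathlib
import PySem

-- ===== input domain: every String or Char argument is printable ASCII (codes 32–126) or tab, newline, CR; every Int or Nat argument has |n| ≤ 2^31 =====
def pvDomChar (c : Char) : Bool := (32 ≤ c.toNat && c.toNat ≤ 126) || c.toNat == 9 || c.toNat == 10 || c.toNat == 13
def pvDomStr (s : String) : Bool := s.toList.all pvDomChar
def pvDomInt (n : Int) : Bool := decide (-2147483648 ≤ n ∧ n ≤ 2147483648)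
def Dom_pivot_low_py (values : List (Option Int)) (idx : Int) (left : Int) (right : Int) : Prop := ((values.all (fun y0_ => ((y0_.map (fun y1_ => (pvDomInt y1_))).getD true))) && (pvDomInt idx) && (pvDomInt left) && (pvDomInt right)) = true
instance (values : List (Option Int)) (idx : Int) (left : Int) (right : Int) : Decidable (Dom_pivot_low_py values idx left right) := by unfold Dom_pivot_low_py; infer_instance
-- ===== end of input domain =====

-- B replaces A's window slice plus three library reductions (any-None scan, min, count)
-- by a recursive per-neighbour check over the left and right index intervals
-- (objective: alternative decomposition; same return value on Pre_).

-- ===== PORT A =====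
def pivot_low_py (values : List (Option Int)) (idx : Int) (left : Int) (right : Int) : Bool :=
  if idx - left < 0 || (values.length : Int) ≤ idx + right then false
  else
    match PySem.List.pyGet? values idx with
    | none => false
    | some none => false
    | some (some c) =>
      let window := PySem.List.slice values (some (idx - left)) (some (idx + right + 1))
      if window.any (fun v => v == (none : Option Int)) then false
      else
        match PySem.List.min? (window.filterMap id) (fun x => x) with
        | none => false
        | some m => if c ≠ m then false else decide (window.count (some c) = 1)

-- ===== PORT B =====
-- recursive helper: all values at positions start..stop-1 are non-None and > center
def pvStrictAbove (values : List (Option Int)) (start stop center : Int) : Bool :=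
  if _h : start < stop then
    match PySem.List.pyGet? values start with
    | some (some v) => if center < v then pvStrictAbove values (start + 1) stop center else false
    | _ => false
  else true
termination_by (stop - start).toNat
decreasing_by omega

def pivot_low_py_alt (values : List (Option Int)) (idx : Int) (left : Int) (right : Int) : Bool :=
  let lo := idx - left
  let hi := idx + right
  if lo < 0 || (values.length : Int) ≤ hi then false
  else
    match PySem.List.pyGet? values idx with
    | some (some c) =>
        pvStrictAbove values lo idx c && pvStrictAbove values (idx + 1) (hi + 1) c
    | _ => false

-- ===== PRECONDITION & SPEC =====
-- Pre_ excludes negative window radii (left < 0 or right < 0) that still pass the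
-- bounds guard: those inputs lie outside the natural domain of window radii — there
-- A may raise IndexError (idx itself out of range) or min() raises ValueError on an
-- empty window, and where A does return, the window does not even contain the center,
-- so its True/False values are accidents of slicing.
def Pre_pivot_low_py (values : List (Option Int)) (idx : Int) (left : Int) (right : Int) : Prop :=
  (idx - left < 0 ∨ (values.length : Int) ≤ idx + right) ∨ (0 ≤ left ∧ 0 ≤ right)
instance (values : List (Option Int)) (idx : Int) (left : Int) (right : Int) : Decidable (Pre_pivot_low_py values idx left right) := by unfold Pre_pivot_low_py; infer_instance
def pvWitness_pivot_low_py : List (Option Int) × Int × Int × Int := ([some 3, some 1, some 2], 1, 1, 1)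

def Spec_pivot_low_py (values : List (Option Int)) (idx : Int) (left : Int) (right : Int) (out : Bool) : Prop := out = pivot_low_py_alt values idx left right
instance (values : List (Option Int)) (idx : Int) (left : Int) (right : Int) (out : Bool) : Decidable (Spec_pivot_low_py values idx left right out) := by unfold Spec_pivot_low_py; infer_instance

-- ===== CLAIM (what is proved, stated in full; the proofs are below) =====
def Claim_equal_pivot_low_py : Prop := ∀ (values : List (Option Int)) (idx : Int) (left : Int) (right : Int), Dom_pivot_low_py values idx left right → Pre_pivot_low_py values idx left right → Spec_pivot_low_py values idx left right (pivot_low_py values idx left right)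

-- ===== LEMMAS AND PROOFS =====

theorem pv_Achar (c : Int) (w1 w2 : List (Option Int)) :
    ((w1 ++ some c :: w2).any (fun v => v == (none : Option Int)) = false
      ∧ PySem.List.min? ((w1 ++ some c :: w2).filterMap id) (fun x => x) = some c
      ∧ (w1 ++ some c :: w2).count (some c) = 1)
    ↔ ((∀ x ∈ w1, ∃ v, x = some v ∧ c < v) ∧ (∀ x ∈ w2, ∃ v, x = some v ∧ c < v)) := by
  constructor
  · rintro ⟨h1, h2, h3⟩
    have hnone : ∀ x ∈ w1 ++ some c :: w2, x ≠ (none : Option Int) := by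
      intro x hx
      have := List.any_eq_false.mp h1 x hx
      simpa using this
    have hmin := PySem.List.min?_isMin h2
    have hc1 : (some c : Option Int) ∉ w1 ∧ (some c : Option Int) ∉ w2 := by
      rw [List.count_append, List.count_cons_self] at h3
      have e1 : w1.count (some c) = 0 := by omega
      have e2 : w2.count (some c) = 0 := by omega
      exact ⟨List.count_eq_zero.mp e1, List.count_eq_zero.mp e2⟩
    constructor
    · intro x hx
      obtain ⟨v, rfl⟩ : ∃ v, x = some v := by
        cases x with
        | none => exact absurd rfl (hnone _ (by simp [hx]))
        | some v => exact ⟨v, rfl⟩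
      refine ⟨v, rfl, ?_⟩
      have hvL : v ∈ (w1 ++ some c :: w2).filterMap id := by
        exact List.mem_filterMap.mpr ⟨some v, by simp [hx], rfl⟩
      have hle : c ≤ v := hmin v hvL
      have hne : v ≠ c := fun h => hc1.1 (h ▸ hx)
      exact lt_of_le_of_ne hle (Ne.symm hne)
    · intro x hx
      obtain ⟨v, rfl⟩ : ∃ v, x = some v := by
        cases x with
        | none => exact absurd rfl (hnone _ (by simp [hx]))
        | some v => exact ⟨v, rfl⟩
      refine ⟨v, rfl, ?_⟩
      have hvL : v ∈ (w1 ++ some c :: w2).filterMap id := by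
        exact List.mem_filterMap.mpr ⟨some v, by simp [hx], rfl⟩
      have hle : c ≤ v := hmin v hvL
      have hne : v ≠ c := fun h => hc1.2 (h ▸ hx)
      exact lt_of_le_of_ne hle (Ne.symm hne)
  · rintro ⟨H1, H2⟩
    have hmem : ∀ x ∈ w1 ++ some c :: w2, x = some c ∨ ∃ v, x = some v ∧ c < v := by
      intro x hx
      rcases List.mem_append.mp hx with h | h
      · exact Or.inr (H1 x h)
      · rcases List.mem_cons.mp h with h | h
        · exact Or.inl h
        · exact Or.inr (H2 x h)
    refine ⟨?_, ?_, ?_⟩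
    · apply List.any_eq_false.mpr
      intro x hx
      rcases hmem x hx with h | ⟨v, h, _⟩ <;> simp [h]
    · have hcL : c ∈ (w1 ++ some c :: w2).filterMap id :=
        List.mem_filterMap.mpr ⟨some c, by simp, rfl⟩
      cases hm : PySem.List.min? ((w1 ++ some c :: w2).filterMap id) (fun x => x) with
      | none =>
          exact absurd ((PySem.List.min?_eq_none_iff _ _).mp hm ▸ hcL) (List.not_mem_nil)
      | some m =>
          have hmle : m ≤ c := PySem.List.min?_isMin hm c hcL
          have hmmem := PySem.List.min?_mem hm
          obtain ⟨x, hxw, hxm⟩ := List.mem_filterMap.mp hmmem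
          have hx : x = some m := hxm
          have hcm : c ≤ m := by
            rcases hmem x hxw with h | ⟨v, h, hv⟩
            · rw [h] at hx; injection hx with h'; omega
            · rw [h] at hx; injection hx with h'; omega
          rw [le_antisymm hmle hcm]
    · rw [List.count_append, List.count_cons_self]
      have e1 : w1.count (some c) = 0 := List.count_eq_zero.mpr (fun h => by
        obtain ⟨v, hv, hlt⟩ := H1 _ h; injection hv with h'; omega)
      have e2 : w2.count (some c) = 0 := List.count_eq_zero.mpr (fun h => by
        obtain ⟨v, hv, hlt⟩ := H2 _ h; injection hv with h'; omega)
      omega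

theorem pv_forall_range_iff (values : List (Option Int)) (a b : Int) (pred : Option Int → Prop)
    (h0 : 0 ≤ a) (hab : a ≤ b) (hb : b ≤ (values.length : Int)) :
    (∀ p : Int, a ≤ p → p < b →
      (match PySem.List.pyGet? values p with | some x => pred x | none => False))
    ↔ ∀ x ∈ List.take (b.toNat - a.toNat) (List.drop a.toNat values), pred x := by
  constructor
  · intro H x hx
    obtain ⟨j, hj, hxe⟩ := List.mem_iff_getElem.mp hx
    have hjlen : j < b.toNat - a.toNat ∧ a.toNat + j < values.length := by
      simp only [List.length_take, List.length_drop] at hj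
      omega
    have hxv : x = values[a.toNat + j]'(hjlen.2) := by
      rw [← hxe]
      simp [List.getElem_take, List.getElem_drop]
    have hp := H (a + j) (by omega) (by omega)
    rw [PySem.List.pyGet?_eq_some_getElem values (by omega) (by omega)] at hp
    have ht : (a + (j : Int)).toNat = a.toNat + j := by omega
    simp only [ht] at hp
    rw [hxv]
    exact hp
  · intro H p hap hpb
    have h0p : 0 ≤ p := le_trans h0 hap
    have hplt : p < (values.length : Int) := lt_of_lt_of_le hpb hb
    rw [PySem.List.pyGet?_eq_some_getElem values h0p hplt]
    apply H
    apply List.mem_iff_getElem.mpr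
    have hlen : p.toNat < values.length := by omega
    refine ⟨p.toNat - a.toNat, ?_, ?_⟩
    · simp only [List.length_take, List.length_drop]
      omega
    · simp only [List.getElem_take, List.getElem_drop]
      congr 1
      omega

theorem pv_strictAbove_iff (values : List (Option Int)) (c : Int) :
    ∀ (n : Nat) (a b : Int), (b - a).toNat = n →
    (pvStrictAbove values a b c = true
      ↔ ∀ p : Int, a ≤ p → p < b →
        (match PySem.List.pyGet? values p with
         | some x => (∃ v, x = some v ∧ c < v) | none => False)) := by
  intro n
  induction n with
  | zero =>
    intro a b hn
    rw [pvStrictAbove]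
    have : ¬ a < b := by omega
    simp only [this, dif_neg, not_false_iff]
    constructor
    · intro _ p h1 h2; omega
    · intro _; trivial
  | succ k ih =>
    intro a b hn
    rw [pvStrictAbove]
    have hab : a < b := by omega
    simp only [hab, dif_pos]
    cases hg : PySem.List.pyGet? values a with
    | none =>
      simp only []
      constructor
      · intro h; exact absurd h (by simp)
      · intro H
        have := H a le_rfl hab
        rw [hg] at this
        exact absurd this (by simp)
    | some x =>
      cases x with
      | none =>
        simp only []
        constructor
        · intro h; exact absurd h (by simp)
        · intro H
          have := H a le_rfl hab
          rw [hg] at this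
          obtain ⟨v, hv, _⟩ := this
          exact absurd hv (by simp)
      | some v =>
        simp only []
        by_cases hcv : c < v
        · simp only [hcv, if_pos]
          rw [ih (a + 1) b (by omega)]
          constructor
          · intro H p h1 h2
            rcases eq_or_lt_of_le h1 with h | h
            · subst h
              rw [hg]
              exact ⟨v, rfl, hcv⟩
            · exact H p (by omega) h2
          · intro H p h1 h2
            exact H p (by omega) h2
        · simp only [hcv, if_neg, not_false_iff]
          constructor
          · intro h; exact absurd h (by simp)
          · intro H
            have := H a le_rfl hab
            rw [hg] at this
            obtain ⟨v', hv', hlt⟩ := this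
            injection hv' with h'
            omega

theorem pv_bool_ext (A B : Bool) (h : A = true ↔ B = true) : A = B := by
  cases A <;> cases B <;> simp_all

theorem pv_main (values : List (Option Int)) (idx left right : Int)
    (hpre : (idx - left < 0 ∨ (values.length : Int) ≤ idx + right) ∨ (0 ≤ left ∧ 0 ≤ right)) :
    pivot_low_py values idx left right = pivot_low_py_alt values idx left right := by
  unfold pivot_low_py pivot_low_py_alt
  dsimp only
  by_cases hg : (decide (idx - left < 0) || decide ((values.length : Int) ≤ idx + right)) = true
  · rw [if_pos hg, if_pos hg]
  · rw [if_neg hg, if_neg hg]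
    simp only [Bool.or_eq_true, decide_eq_true_eq, not_or] at hg
    obtain ⟨hg1, hg2⟩ := hg
    have hlr : 0 ≤ left ∧ 0 ≤ right := by
      rcases hpre with h | h
      · rcases h with h | h <;> omega
      · exact h
    have hi0 : 0 ≤ idx := by omega
    have hilt : idx < (values.length : Int) := by omega
    rw [PySem.List.pyGet?_eq_some_getElem values hi0 hilt]
    cases hc : values[idx.toNat] with
    | none => rfl
    | some c =>
      simp only []
      have ha0 : (0:Int) ≤ idx - left := by omega
      have hb0 : (0:Int) ≤ idx + right + 1 := by omega
      rw [PySem.List.slice_toNat values ha0 hb0]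
      set W := List.take ((idx + right + 1).toNat - (idx - left).toNat)
                 (List.drop (idx - left).toNat values) with hWdef
      set j0 := idx.toNat - (idx - left).toNat with hj0
      have hWlen : W.length = (idx + right + 1).toNat - (idx - left).toNat := by
        rw [hWdef]; simp only [List.length_take, List.length_drop]; omega
      have hj0lt : j0 < W.length := by omega
      have hWj0 : W[j0]'hj0lt = some c := by
        have e : (idx - left).toNat + j0 = idx.toNat := by omega
        simp only [hWdef, List.getElem_take, List.getElem_drop]
        rw [getElem_congr rfl e (by omega)]
        exact hc
      set w1 := W.take j0 with hw1
      set w2 := W.drop (j0 + 1) with hw2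
      have hW : W = w1 ++ some c :: w2 := by
        conv_lhs => rw [← List.take_append_drop j0 W]
        rw [hw1, hw2]
        congr 1
        rw [List.drop_eq_getElem_cons hj0lt, hWj0]
      rw [hW]
      have hw1eq : w1 = List.take (idx.toNat - (idx - left).toNat)
          (List.drop (idx - left).toNat values) := by
        rw [hw1, hWdef, List.take_take,
          show min j0 ((idx + right + 1).toNat - (idx - left).toNat)
              = idx.toNat - (idx - left).toNat from by omega]
      have hw2eq : w2 = List.take ((idx + right + 1).toNat - (idx + 1).toNat)
          (List.drop (idx + 1).toNat values) := by
        rw [hw2, hWdef, List.drop_take, List.drop_drop,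
          show (idx + right + 1).toNat - (idx - left).toNat - (j0 + 1)
              = (idx + right + 1).toNat - (idx + 1).toNat from by omega,
          show (idx - left).toNat + (j0 + 1) = (idx + 1).toNat from by omega]
      apply pv_bool_ext
      have hA : ((if (w1 ++ some c :: w2).any (fun v => v == (none : Option Int)) then false
            else match PySem.List.min? ((w1 ++ some c :: w2).filterMap id) (fun x => x) with
              | none => false
              | some m => if c ≠ m then false
                  else decide ((w1 ++ some c :: w2).count (some c) = 1)) = true)
          ↔ ((∀ x ∈ w1, ∃ v, x = some v ∧ c < v) ∧ (∀ x ∈ w2, ∃ v, x = some v ∧ c < v)) := by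
        rw [← pv_Achar c w1 w2]
        cases hany : (w1 ++ some c :: w2).any (fun v => v == (none : Option Int)) with
        | true => simp
        | false =>
          simp only [Bool.false_eq_true, if_false]
          cases hm : PySem.List.min? ((w1 ++ some c :: w2).filterMap id) (fun x => x) with
          | none => simp
          | some m =>
            by_cases hcm : c = m
            · subst hcm; simp
            · simp [hcm]
              intro h
              exact absurd h.symm hcm
      have e1 : (pvStrictAbove values (idx - left) idx c = true)
          ↔ ∀ x ∈ w1, ∃ v, x = some v ∧ c < v := by
        rw [pv_strictAbove_iff values c (idx - (idx - left)).toNat (idx - left) idx rfl, hw1eq]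
        exact pv_forall_range_iff values (idx - left) idx
          (fun x => ∃ v, x = some v ∧ c < v) (by omega) (by omega) (by omega)
      have e3 : (pvStrictAbove values (idx + 1) (idx + right + 1) c = true)
          ↔ ∀ x ∈ w2, ∃ v, x = some v ∧ c < v := by
        rw [pv_strictAbove_iff values c ((idx + right + 1) - (idx + 1)).toNat
              (idx + 1) (idx + right + 1) rfl, hw2eq]
        exact pv_forall_range_iff values (idx + 1) (idx + right + 1)
          (fun x => ∃ v, x = some v ∧ c < v) (by omega) (by omega) (by omega)
      rw [hA, Bool.and_eq_true, e1, e3]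

-- ===== VERDICT (by name: the statement is the Claim_ definition above) =====
theorem pivot_low_py_spec : Claim_equal_pivot_low_py := by
  intro values idx left right _ hpre
  unfold Pre_pivot_low_py at hpre
  unfold Spec_pivot_low_py
  exact pv_main values idx left right hpre
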